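-- pv_equiv track=rewrite | github.com/Next-Liu/Leetcode-Python | 蓝桥杯/三带一.py | check
-- ===== SOURCE A (Python) =====
-- def check(str):
--     b = {}
--     for i in str:
--         b[i] = b.get(i, 0) + 1
--     if len(b.keys()) == 2:
--         for key in b.keys():
--             if b[key] == 3:
--                 return "Yes"
--     return "No"
-- ===== SOURCE B (Python) =====
-- def check(str):
--     s = sorted(str)
--     runs = []
--     i = 0
--     n = len(s)
--     while i < n:
--         j = i
--         while j < n and s[j] == s[i]:
--             j += 1
--         runs.append(j - i)
--         i = j
--     return "Yes" if len(runs) == 2 and 3 in runs else "No"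
-- ===== Notes on version B (the rewrite author's own statement) =====
-- stated objective: alternative
-- what changed: Replaces the frequency dictionary with sort-then-group: sort the characters, compute run lengths of consecutive equal characters by a linear scan, and answer Yes iff there are exactly 2 runs and one has length 3.
import Mathlib
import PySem

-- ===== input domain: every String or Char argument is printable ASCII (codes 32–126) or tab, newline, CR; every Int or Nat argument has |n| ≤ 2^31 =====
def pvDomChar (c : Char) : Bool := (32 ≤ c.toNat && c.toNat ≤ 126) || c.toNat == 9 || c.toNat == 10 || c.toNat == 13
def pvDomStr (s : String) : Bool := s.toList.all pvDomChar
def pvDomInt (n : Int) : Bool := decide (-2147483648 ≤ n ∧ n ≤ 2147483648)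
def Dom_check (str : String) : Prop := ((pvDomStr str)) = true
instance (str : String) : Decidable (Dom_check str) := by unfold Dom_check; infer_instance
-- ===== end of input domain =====

-- B replaces A's frequency dictionary with sort-then-group run lengths (alternative decomposition, not faster).

-- ===== PORT A =====
def check (str : String) : String :=
  let b := str.toList.foldl (fun d i => d.insert i (d.getD i 0 + 1)) (PySem.Dict.empty : PySem.Dict Char Int)
  if b.keys.length == 2 then
    -- 'for key in b.keys(): if b[key] == 3: return "Yes"'; every key is present, so b[key] = b.getD key 0
    if b.keys.any (fun key => b.getD key 0 == 3) then "Yes" else "No"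
  else "No"

-- ===== PORT B =====
-- run lengths of consecutive equal characters (the while-loop scan over the sorted list)
def pvRuns : List Char → List Int
  | [] => []
  | c :: rest =>
      (((rest.takeWhile (fun x => x == c)).length : Int) + 1) :: pvRuns (rest.dropWhile (fun x => x == c))
termination_by s => s.length
decreasing_by
  simpa using Nat.lt_succ_of_le (List.length_dropWhile_le _ _)

def check_alt (str : String) : String :=
  let s := PySem.List.sorted str.toList (fun x => x) false
  let runs := pvRuns s
  if runs.length == 2 && runs.contains 3 then "Yes" else "No"

-- ===== PRECONDITION & SPEC =====
def Spec_check (str : String) (out : String) : Prop := out = check_alt str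
instance (str : String) (out : String) : Decidable (Spec_check str out) := by unfold Spec_check; infer_instance

-- ===== CLAIM (what is proved, stated in full; the proofs are below) =====
def Claim_equal_check : Prop := ∀ (str : String), Dom_check str → Spec_check str (check str)

-- ===== LEMMAS AND PROOFS =====

-- In a sorted list c :: rest, the first character never reappears after its run.
lemma not_mem_dropWhile_of_sorted (c : Char) (rest : List Char)
    (h : (c :: rest).Pairwise (· ≤ ·)) :
    c ∉ rest.dropWhile (fun x => x == c) := by
  intro hc
  have hsub := List.dropWhile_sublist (l := rest) (fun x => x == c)
  have hp : (rest.dropWhile (fun x => x == c)).Pairwise (· ≤ ·) :=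
    (List.pairwise_cons.mp h).2.sublist hsub
  have hle : ∀ x ∈ rest, c ≤ x := (List.pairwise_cons.mp h).1
  cases hd : rest.dropWhile (fun x => x == c) with
  | nil => simp [hd] at hc
  | cons h₀ d' =>
    have hne : (h₀ == c) = false := by
      have := List.head_dropWhile_not (fun x => x == c) (l := rest) (by simp [hd])
      simpa [hd] using this
    have hne' : h₀ ≠ c := by simpa using hne
    rw [hd] at hc
    rcases List.mem_cons.mp hc with heq | hc'
    · exact hne' heq.symm
    · have h1 : h₀ ≤ c := by
        rw [hd] at hp
        exact (List.pairwise_cons.mp hp).1 c hc'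
      have h2 : c ≤ h₀ := hle h₀ (hsub.mem (by rw [hd]; exact List.mem_cons_self ..))
      exact hne' (le_antisymm h1 h2)

-- On a sorted list the number of runs is the number of distinct characters.
lemma runs_len (s : List Char) (h : s.Pairwise (· ≤ ·)) :
    (pvRuns s).length = s.toFinset.card := by
  induction s using pvRuns.induct with
  | case1 => simp [pvRuns]
  | case2 c rest ih =>
    have hp : rest.Pairwise (· ≤ ·) := (List.pairwise_cons.mp h).2
    have hdp : (rest.dropWhile (fun x => x == c)).Pairwise (· ≤ ·) :=
      hp.sublist (List.dropWhile_sublist _)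
    have hcnot : c ∉ rest.dropWhile (fun x => x == c) := not_mem_dropWhile_of_sorted c rest h
    have htf : (c :: rest).toFinset = insert c (rest.dropWhile (fun x => x == c)).toFinset := by
      ext x
      simp only [List.mem_toFinset, Finset.mem_insert, List.mem_cons]
      constructor
      · rintro (rfl | hx)
        · exact Or.inl rfl
        · rw [← List.takeWhile_append_dropWhile (p := fun x => x == c) (l := rest)] at hx
          rcases List.mem_append.mp hx with hx | hx
          · exact Or.inl (by simpa using List.mem_takeWhile_imp hx)
          · exact Or.inr hx
      · rintro (rfl | hx)
        · exact Or.inl rfl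
        · exact Or.inr ((List.dropWhile_sublist _).mem hx)
    rw [pvRuns, List.length_cons, htf,
        Finset.card_insert_of_notMem (by simpa using hcnot), ih hdp]

-- On a sorted list, 3 is a run length iff some character occurs exactly 3 times.
lemma runs_mem3 (s : List Char) (h : s.Pairwise (· ≤ ·)) :
    ((3:Int) ∈ pvRuns s ↔ ∃ c, s.count c = 3) := by
  induction s using pvRuns.induct with
  | case1 =>
    simp [pvRuns]
  | case2 c rest ih =>
    have hp : rest.Pairwise (· ≤ ·) := (List.pairwise_cons.mp h).2
    have hdp : (rest.dropWhile (fun x => x == c)).Pairwise (· ≤ ·) :=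
      hp.sublist (List.dropWhile_sublist _)
    have hcnot : c ∉ rest.dropWhile (fun x => x == c) := not_mem_dropWhile_of_sorted c rest h
    have htcount : (rest.takeWhile (fun x => x == c)).count c
        = (rest.takeWhile (fun x => x == c)).length :=
      List.count_eq_length.mpr (fun b hb => (by simpa using List.mem_takeWhile_imp hb : b = c).symm)
    have hccount : (c :: rest).count c = (rest.takeWhile (fun x => x == c)).length + 1 := by
      rw [List.count_cons_self]
      conv_lhs => rw [← List.takeWhile_append_dropWhile (p := fun x => x == c) (l := rest)]
      rw [List.count_append, htcount, List.count_eq_zero.mpr hcnot]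
    have hother : ∀ x, x ≠ c →
        (c :: rest).count x = (rest.dropWhile (fun x => x == c)).count x := by
      intro x hx
      have hcx : (c == x) = false := by simp [Ne.symm hx]
      conv_lhs => rw [← List.takeWhile_append_dropWhile (p := fun x => x == c) (l := rest)]
      rw [List.count_cons, List.count_append, hcx,
        List.count_eq_zero.mpr (fun hmem => hx (by simpa using List.mem_takeWhile_imp hmem))]
      simp
    rw [pvRuns]
    simp only [List.mem_cons]
    constructor
    · rintro (h3 | h3)
      · exact ⟨c, by rw [hccount]; omega⟩
      · obtain ⟨x, hx⟩ := (ih hdp).mp h3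
        have hxm : x ∈ rest.dropWhile (fun x => x == c) :=
          List.count_pos_iff.mp (by omega)
        have hxc : x ≠ c := fun e => hcnot (e ▸ hxm)
        exact ⟨x, by rw [hother x hxc]; exact hx⟩
    · rintro ⟨x, hx⟩
      by_cases hxc : x = c
      · subst hxc
        rw [hccount] at hx
        exact Or.inl (by omega)
      · exact Or.inr ((ih hdp).mpr ⟨x, by rw [← hother x hxc]; exact hx⟩)

-- set(l) has as many elements as l has distinct characters.
lemma ofList_length (l : List Char) :
    (PySem.Set.ofList l).length = l.toFinset.card := by
  rw [← List.toFinset_card_of_nodup (PySem.Set.nodup_ofList l)]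
  congr 1
  ext x
  simp [PySem.Set.mem_ofList]

-- ===== VERDICT (by name: the statement is the Claim_ definition above) =====
theorem check_spec : Claim_equal_check := by
  intro str _
  unfold Spec_check check check_alt
  dsimp only
  rw [PySem.Dict.foldl_insert_getD_add_one_eq_counter, PySem.Dict.keys_counter]
  set l := str.toList with hl
  set sl := PySem.List.sorted l (fun x => x) false with hsl
  have hperm : sl.Perm l := PySem.List.sorted_perm l (fun x => x) false
  have hsorted : sl.Pairwise (· ≤ ·) := by
    simpa using PySem.List.sorted_pairwise l (fun x => x)
  have htfeq : sl.toFinset = l.toFinset := by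
    ext x; simp [hperm.mem_iff]
  have hlen : (pvRuns sl).length = l.toFinset.card := by
    rw [runs_len sl hsorted, htfeq]
  have hmem3 : ((3:Int) ∈ pvRuns sl) ↔ ∃ c, l.count c = 3 := by
    rw [runs_mem3 sl hsorted]
    constructor
    · rintro ⟨c, hc⟩; exact ⟨c, by rw [← hperm.count_eq]; exact hc⟩
    · rintro ⟨c, hc⟩; exact ⟨c, by rw [hperm.count_eq]; exact hc⟩
  have hany : ((PySem.Set.ofList l).any
      (fun key => (PySem.Dict.counter l).getD key 0 == 3) = true) ↔ ∃ c, l.count c = 3 := by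
    rw [List.any_eq_true]
    constructor
    · rintro ⟨k, hk, hk3⟩
      refine ⟨k, ?_⟩
      rw [PySem.Dict.getD_counter] at hk3
      exact_mod_cast (by simpa using hk3 : (l.count k : Int) = 3)
    · rintro ⟨c, hc⟩
      have hcmem : c ∈ l := List.count_pos_iff.mp (by omega)
      exact ⟨c, (PySem.Set.mem_ofList l c).mpr hcmem,
        by rw [PySem.Dict.getD_counter]; simp [hc]⟩
  have hA : ((PySem.Set.ofList l).length == 2) = ((pvRuns sl).length == 2) := by
    rw [ofList_length, hlen]
  have hB : ((PySem.Set.ofList l).any (fun key => (PySem.Dict.counter l).getD key 0 == 3))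
      = ((pvRuns sl).contains 3) := by
    apply Bool.eq_iff_iff.mpr
    simp only [List.contains_eq_mem, decide_eq_true_eq]
    exact hany.trans hmem3.symm
  rw [hA, hB]
  cases hc1 : ((pvRuns sl).length == 2) <;> cases hc2 : (pvRuns sl).contains 3 <;> simp
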